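-- pv_equiv track=rewrite | github.com/ojpb2000/Gen-Z-Female-Population-Dashboard | genz_age_analysis.py | categorize_region
-- ===== SOURCE A (Python) =====
-- def categorize_region(dma):
--     dma_lower = dma.lower()
--     if any(state in dma_lower for state in ['california', 'los angeles', 'san francisco', 'san diego']):
--         return 'West Coast'
--     elif any(state in dma_lower for state in ['texas', 'houston', 'dallas', 'austin']):
--         return 'Texas'
--     elif any(state in dma_lower for state in ['florida', 'miami', 'orlando', 'tampa']):
--         return 'Florida'
--     elif any(state in dma_lower for state in ['new york', 'buffalo', 'rochester']):
--         return 'New York'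
--     elif any(state in dma_lower for state in ['washington', 'seattle']):
--         return 'Pacific Northwest'
--     elif any(state in dma_lower for state in ['utah', 'salt lake']):
--         return 'Mountain West'
--     elif any(state in dma_lower for state in ['colorado', 'denver']):
--         return 'Rocky Mountains'
--     elif any(state in dma_lower for state in ['arizona', 'phoenix']):
--         return 'Southwest'
--     elif any(state in dma_lower for state in ['georgia', 'atlanta']):
--         return 'Southeast'
--     elif any(state in dma_lower for state in ['north carolina', 'charlotte', 'raleigh']):
--         return 'Carolinas'
--     elif any(state in dma_lower for state in ['ohio', 'cleveland', 'columbus']):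
--         return 'Ohio'
--     elif any(state in dma_lower for state in ['pennsylvania', 'philadelphia', 'pittsburgh']):
--         return 'Pennsylvania'
--     elif any(state in dma_lower for state in ['illinois', 'chicago']):
--         return 'Illinois'
--     elif any(state in dma_lower for state in ['michigan', 'detroit']):
--         return 'Michigan'
--     elif any(state in dma_lower for state in ['wisconsin', 'milwaukee']):
--         return 'Wisconsin'
--     elif any(state in dma_lower for state in ['minnesota', 'minneapolis']):
--         return 'Minnesota'
--     elif any(state in dma_lower for state in ['massachusetts', 'boston']):
--         return 'Massachusetts'
--     else:
--         return 'Other'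
-- ===== SOURCE B (Python) =====
-- REGIONS = ['West Coast', 'Texas', 'Florida', 'New York', 'Pacific Northwest',
--            'Mountain West', 'Rocky Mountains', 'Southwest', 'Southeast',
--            'Carolinas', 'Ohio', 'Pennsylvania', 'Illinois', 'Michigan',
--            'Wisconsin', 'Minnesota', 'Massachusetts']
--
-- KEYWORD_REGION = {
--     'california': 'West Coast', 'los angeles': 'West Coast',
--     'san francisco': 'West Coast', 'san diego': 'West Coast',
--     'texas': 'Texas', 'houston': 'Texas', 'dallas': 'Texas', 'austin': 'Texas',
--     'florida': 'Florida', 'miami': 'Florida', 'orlando': 'Florida', 'tampa': 'Florida',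
--     'new york': 'New York', 'buffalo': 'New York', 'rochester': 'New York',
--     'washington': 'Pacific Northwest', 'seattle': 'Pacific Northwest',
--     'utah': 'Mountain West', 'salt lake': 'Mountain West',
--     'colorado': 'Rocky Mountains', 'denver': 'Rocky Mountains',
--     'arizona': 'Southwest', 'phoenix': 'Southwest',
--     'georgia': 'Southeast', 'atlanta': 'Southeast',
--     'north carolina': 'Carolinas', 'charlotte': 'Carolinas', 'raleigh': 'Carolinas',
--     'ohio': 'Ohio', 'cleveland': 'Ohio', 'columbus': 'Ohio',
--     'pennsylvania': 'Pennsylvania', 'philadelphia': 'Pennsylvania', 'pittsburgh': 'Pennsylvania',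
--     'illinois': 'Illinois', 'chicago': 'Illinois',
--     'michigan': 'Michigan', 'detroit': 'Michigan',
--     'wisconsin': 'Wisconsin', 'milwaukee': 'Wisconsin',
--     'minnesota': 'Minnesota', 'minneapolis': 'Minnesota',
--     'massachusetts': 'Massachusetts', 'boston': 'Massachusetts',
-- }
--
-- def categorize_region(dma):
--     dma_lower = dma.lower()
--     # stage 1: collect the regions of ALL matching keywords
--     hits = [region for kw, region in KEYWORD_REGION.items() if kw in dma_lower]
--     # stage 2: pick the highest-priority matched region
--     return next((r for r in REGIONS if r in hits), 'Other')
-- ===== Notes on version B (the rewrite author's own statement) =====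
-- stated objective: alternative
-- what changed: Instead of A's 17-way if/elif ladder with early return, B matches in two stages: one pass over a flat keyword-to-region dict collects ALL matched regions, then a second pass over the priority-ordered region list returns the first matched one.
import Mathlib
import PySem

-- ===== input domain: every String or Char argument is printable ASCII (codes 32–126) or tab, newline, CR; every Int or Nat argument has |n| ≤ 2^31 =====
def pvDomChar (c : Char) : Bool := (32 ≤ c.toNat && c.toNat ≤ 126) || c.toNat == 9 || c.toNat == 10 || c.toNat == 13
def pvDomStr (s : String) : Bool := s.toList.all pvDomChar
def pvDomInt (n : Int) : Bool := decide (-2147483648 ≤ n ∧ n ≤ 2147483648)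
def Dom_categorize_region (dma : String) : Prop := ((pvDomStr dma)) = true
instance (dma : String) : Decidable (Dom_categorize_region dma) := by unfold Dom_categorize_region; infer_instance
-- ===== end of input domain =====

-- B: two-stage matching — collect ALL matched regions from a flat keyword→region table, then select the highest-priority one — instead of A's 17-way if/elif ladder with early return (alternative decomposition).


-- ===== PORT A =====
def categorize_region (dma : String) : String :=
  let dma_lower := PySem.Str.lower dma
  if ["california", "los angeles", "san francisco", "san diego"].any (fun st => PySem.Str.isIn st dma_lower) then "West Coast"
  else if ["texas", "houston", "dallas", "austin"].any (fun st => PySem.Str.isIn st dma_lower) then "Texas"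
  else if ["florida", "miami", "orlando", "tampa"].any (fun st => PySem.Str.isIn st dma_lower) then "Florida"
  else if ["new york", "buffalo", "rochester"].any (fun st => PySem.Str.isIn st dma_lower) then "New York"
  else if ["washington", "seattle"].any (fun st => PySem.Str.isIn st dma_lower) then "Pacific Northwest"
  else if ["utah", "salt lake"].any (fun st => PySem.Str.isIn st dma_lower) then "Mountain West"
  else if ["colorado", "denver"].any (fun st => PySem.Str.isIn st dma_lower) then "Rocky Mountains"
  else if ["arizona", "phoenix"].any (fun st => PySem.Str.isIn st dma_lower) then "Southwest"
  else if ["georgia", "atlanta"].any (fun st => PySem.Str.isIn st dma_lower) then "Southeast"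
  else if ["north carolina", "charlotte", "raleigh"].any (fun st => PySem.Str.isIn st dma_lower) then "Carolinas"
  else if ["ohio", "cleveland", "columbus"].any (fun st => PySem.Str.isIn st dma_lower) then "Ohio"
  else if ["pennsylvania", "philadelphia", "pittsburgh"].any (fun st => PySem.Str.isIn st dma_lower) then "Pennsylvania"
  else if ["illinois", "chicago"].any (fun st => PySem.Str.isIn st dma_lower) then "Illinois"
  else if ["michigan", "detroit"].any (fun st => PySem.Str.isIn st dma_lower) then "Michigan"
  else if ["wisconsin", "milwaukee"].any (fun st => PySem.Str.isIn st dma_lower) then "Wisconsin"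
  else if ["minnesota", "minneapolis"].any (fun st => PySem.Str.isIn st dma_lower) then "Minnesota"
  else if ["massachusetts", "boston"].any (fun st => PySem.Str.isIn st dma_lower) then "Massachusetts"
  else "Other"

-- ===== PORT B =====
-- B's priority list of regions
def pvRegions : List String :=
  ["West Coast", "Texas", "Florida", "New York", "Pacific Northwest",
   "Mountain West", "Rocky Mountains", "Southwest", "Southeast",
   "Carolinas", "Ohio", "Pennsylvania", "Illinois", "Michigan",
   "Wisconsin", "Minnesota", "Massachusetts"]

-- B's flat keyword → region dict (association list in insertion order)
def pvKeywordRegion : List (String × String) :=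
  [("california", "West Coast"), ("los angeles", "West Coast"),
   ("san francisco", "West Coast"), ("san diego", "West Coast"),
   ("texas", "Texas"), ("houston", "Texas"), ("dallas", "Texas"), ("austin", "Texas"),
   ("florida", "Florida"), ("miami", "Florida"), ("orlando", "Florida"), ("tampa", "Florida"),
   ("new york", "New York"), ("buffalo", "New York"), ("rochester", "New York"),
   ("washington", "Pacific Northwest"), ("seattle", "Pacific Northwest"),
   ("utah", "Mountain West"), ("salt lake", "Mountain West"),
   ("colorado", "Rocky Mountains"), ("denver", "Rocky Mountains"),
   ("arizona", "Southwest"), ("phoenix", "Southwest"),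
   ("georgia", "Southeast"), ("atlanta", "Southeast"),
   ("north carolina", "Carolinas"), ("charlotte", "Carolinas"), ("raleigh", "Carolinas"),
   ("ohio", "Ohio"), ("cleveland", "Ohio"), ("columbus", "Ohio"),
   ("pennsylvania", "Pennsylvania"), ("philadelphia", "Pennsylvania"), ("pittsburgh", "Pennsylvania"),
   ("illinois", "Illinois"), ("chicago", "Illinois"),
   ("michigan", "Michigan"), ("detroit", "Michigan"),
   ("wisconsin", "Wisconsin"), ("milwaukee", "Wisconsin"),
   ("minnesota", "Minnesota"), ("minneapolis", "Minnesota"),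
   ("massachusetts", "Massachusetts"), ("boston", "Massachusetts")]

-- next((r for r in regions if r in hits), 'Other'): first region of the priority list found among the hits
def pvFirstMatch : List String → List String → String
  | [], _ => "Other"
  | r :: rest, hits => if hits.contains r then r else pvFirstMatch rest hits

def categorize_region_alt (dma : String) : String :=
  let dma_lower := PySem.Str.lower dma
  -- stage 1: the comprehension [region for kw, region in KEYWORD_REGION.items() if kw in dma_lower]
  let hits := (pvKeywordRegion.filter (fun p => PySem.Str.isIn p.1 dma_lower)).map Prod.snd
  -- stage 2: next((r for r in REGIONS if r in hits), 'Other')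
  pvFirstMatch pvRegions hits

-- ===== PRECONDITION & SPEC =====
def Spec_categorize_region (dma : String) (out : String) : Prop := out = categorize_region_alt dma
instance (dma : String) (out : String) : Decidable (Spec_categorize_region dma out) := by unfold Spec_categorize_region; infer_instance

-- ===== CLAIM =====
def Claim_equal_categorize_region : Prop := ∀ (dma : String), Dom_categorize_region dma → Spec_categorize_region dma (categorize_region dma)

-- ===== LEMMAS AND PROOFS =====

-- membership in the filtered-and-projected hit list, as one scan of the table
theorem contains_map_filter_snd {a b : Type} [BEq b] (l : List (a × b))
    (f : a × b → Bool) (r : b) :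
    ((l.filter f).map Prod.snd).contains r = l.any (fun p => f p && (r == p.2)) := by
  induction l with
  | nil => rfl
  | cons h t ih =>
    by_cases hf : f h = true <;>
      simp [hf, ih, List.any_cons]

-- ===== VERDICT =====
set_option maxHeartbeats 4000000 in
theorem categorize_region_spec : Claim_equal_categorize_region := by
  intro dma _
  unfold Spec_categorize_region categorize_region categorize_region_alt
  simp only [pvFirstMatch, contains_map_filter_snd, pvKeywordRegion, pvRegions,
    List.any_cons, List.any_nil, Bool.and_true, Bool.and_false,
    Bool.or_false, Bool.false_or, String.reduceBEq]
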